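-- pv_equiv track=rewrite | github.com/aifoxmanbbb/pe_test | tmp/recalc_pe_scores_local.py | select_rule
-- ===== SOURCE A (Python) =====
-- def normalize_gender(gender: str | None) -> str:
--     text = str(gender or '').strip().lower()
--     if ('男' in text) or ('male' in text) or text in {'m', '1'}:
--         return 'male'
--     if ('女' in text) or ('female' in text) or text in {'f', '0', '2'}:
--         return 'female'
--     return 'all'
--
-- def select_rule(item_rules: list[dict], gender: str | None) -> dict | None:
--     if not item_rules:
--         return None
--     target = normalize_gender(gender)
--     for rule in item_rules:
--         if normalize_gender(rule.get('gender')) == target: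
--             return rule
--     for rule in item_rules:
--         if normalize_gender(rule.get('gender')) == 'all':
--             return rule
--     return None
-- ===== SOURCE B (Python) =====
-- def normalize_gender(gender: str | None) -> str:
--     text = str(gender or '').strip().lower()
--     if ('男' in text) or ('male' in text) or text in {'m', '1'}:
--         return 'male'
--     if ('女' in text) or ('female' in text) or text in {'f', '0', '2'}:
--         return 'female'
--     return 'all'
--
-- def select_rule(item_rules: list[dict], gender: str | None) -> dict | None:
--     if not item_rules:
--         return None
--     target = normalize_gender(gender)
--     fallback = None
--     for rule in item_rules:
--         g = normalize_gender(rule.get('gender'))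
--         if g == target:
--             return rule
--         if g == 'all' and fallback is None:
--             fallback = rule
--     return fallback
-- ===== Notes on version B (the rewrite author's own statement) =====
-- stated objective: alternative
-- what changed: Replaced A's two sequential passes over item_rules (first for the target gender, then again for 'all') by a single pass that returns on the first target match and records the first 'all' rule as a fallback.
import Mathlib
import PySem

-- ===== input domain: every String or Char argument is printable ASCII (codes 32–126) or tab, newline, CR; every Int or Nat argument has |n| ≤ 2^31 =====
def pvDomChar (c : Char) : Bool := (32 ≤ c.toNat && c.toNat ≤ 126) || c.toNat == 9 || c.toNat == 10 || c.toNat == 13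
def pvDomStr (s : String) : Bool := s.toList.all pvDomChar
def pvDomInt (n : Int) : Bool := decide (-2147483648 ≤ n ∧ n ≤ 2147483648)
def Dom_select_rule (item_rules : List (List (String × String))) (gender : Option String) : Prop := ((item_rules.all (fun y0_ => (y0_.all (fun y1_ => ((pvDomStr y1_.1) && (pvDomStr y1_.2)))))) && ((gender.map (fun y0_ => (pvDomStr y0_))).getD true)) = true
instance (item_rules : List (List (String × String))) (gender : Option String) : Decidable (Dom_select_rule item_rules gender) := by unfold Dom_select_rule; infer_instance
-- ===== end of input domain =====

-- B: one pass over item_rules with a recorded first-'all' fallback instead of A's two passes (objective: alternative decomposition).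
-- ===== PORT A =====
-- shared helper, identical in Source A and Source B
def normalize_gender (gender : Option String) : String :=
  let text := PySem.Str.lower (PySem.Str.strip (gender.getD ""))
  if PySem.Str.isIn "男" text || PySem.Str.isIn "male" text || text == "m" || text == "1" then "male"
  else if PySem.Str.isIn "女" text || PySem.Str.isIn "female" text || text == "f" || text == "0" || text == "2" then "female"
  else "all"

def select_rule (item_rules : List (List (String × String))) (gender : Option String) : Option (List (String × String)) :=
  if item_rules.isEmpty then none
  else
    let target := normalize_gender gender
    match item_rules.find? (fun rule => normalize_gender ((PySem.Dict.mk rule).get? "gender") == target) with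
    | some rule => some rule
    | none => item_rules.find? (fun rule => normalize_gender ((PySem.Dict.mk rule).get? "gender") == "all")

-- ===== PORT B =====
-- single loop: return first target match, remember the first 'all' rule as fallback
def selectLoop (target : String) (fallback : Option (List (String × String))) :
    List (List (String × String)) → Option (List (String × String))
  | [] => fallback
  | rule :: rest =>
    let g := normalize_gender ((PySem.Dict.mk rule).get? "gender")
    if g == target then some rule
    else if g == "all" && fallback.isNone then selectLoop target (some rule) rest
    else selectLoop target fallback rest

def select_rule_alt (item_rules : List (List (String × String))) (gender : Option String) : Option (List (String × String)) :=
  if item_rules.isEmpty then none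
  else selectLoop (normalize_gender gender) none item_rules

-- ===== PRECONDITION & SPEC =====
def Spec_select_rule (item_rules : List (List (String × String))) (gender : Option String) (out : Option (List (String × String))) : Prop := out = select_rule_alt item_rules gender
instance (item_rules : List (List (String × String))) (gender : Option String) (out : Option (List (String × String))) : Decidable (Spec_select_rule item_rules gender out) := by unfold Spec_select_rule; infer_instance

-- ===== CLAIM (what is proved, stated in full; the proofs are below) =====
def Claim_equal_select_rule : Prop := ∀ (item_rules : List (List (String × String))) (gender : Option String), Dom_select_rule item_rules gender → Spec_select_rule item_rules gender (select_rule item_rules gender)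

-- ===== LEMMAS AND PROOFS =====

-- ===== VERDICT (by name: the statement is the Claim_ definition above) =====
-- loop invariant: the single pass equals "first target match, else fallback, else first 'all' match"
theorem selectLoop_eq (target : String) (fb : Option (List (String × String)))
    (l : List (List (String × String))) :
    selectLoop target fb l =
      match l.find? (fun rule => normalize_gender ((PySem.Dict.mk rule).get? "gender") == target) with
      | some rule => some rule
      | none => fb.or (l.find? (fun rule => normalize_gender ((PySem.Dict.mk rule).get? "gender") == "all")) := by
  induction l generalizing fb with
  | nil => simp [selectLoop]
  | cons r rs ih =>
    by_cases ht : (normalize_gender ((PySem.Dict.mk r).get? "gender") == target) = true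
    · simp [selectLoop, List.find?, ht]
    · by_cases ha : (normalize_gender ((PySem.Dict.mk r).get? "gender") == "all") = true
      · cases fb with
        | none => simp [selectLoop, List.find?, ht, ha, ih]
        | some f => simp [selectLoop, List.find?, ht, ha, ih, Option.or]
      · simp [selectLoop, List.find?, ht, ha, ih]

theorem select_rule_spec : Claim_equal_select_rule := by
  intro item_rules gender _
  unfold Spec_select_rule select_rule select_rule_alt
  by_cases h : item_rules.isEmpty
  · simp [h]
  · simp only [h]
    rw [selectLoop_eq]
    rfl
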